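-- pv_equiv track=rewrite | github.com/ATPs/XCProject | course/findHiddenInformationInDNA201612.py | approxiMatchCount
-- ===== SOURCE A (Python) =====
-- def hammingdistance(p,q):
--     '''
--     p and q are two sequence with same length.
--     return the number of non-identical letters
--     '''
--     l = len(p)
--     count = 0
--     for n in range(l):
--         if p[n] != q[n]:
--             count += 1
--     return count
--
-- def approxiMatchCount(kmer, seq, error):
--     '''
--     return position where kmer can match with seq with maximun error mismatches
--     Sample Input:
--     ATTCTGGA
--     CGCCCGAATCCAGAACGCATTCCCATATTTCGGGACCACTGGCCTCCACGGTACGGACGTCAATCAAAT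
--     3
--     Sample Output:
--     6 7 26 27
--     '''
--     l = len(kmer)
--     ps = []
--     for n in range(len(seq) + 1 - l):
--         s = seq[n:n+l]
--         e = hammingdistance(kmer,s)
--         if e <= error:
--             ps.append(n)
--     return len(ps)
-- ===== SOURCE B (Python) =====
-- def approxiMatchCount(kmer, seq, error):
--     # Transposed traversal: instead of computing the Hamming distance window
--     # by window, sweep once per kmer character over all windows, accumulating
--     # a per-window mismatch vector, then count the windows within `error`.
--     m = len(seq) + 1 - len(kmer)
--     if m <= 0:
--         return 0
--     counts = [0] * m
--     for j, ch in enumerate(kmer):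
--         row = seq[j:j + m]
--         counts = [c + (x != ch) for c, x in zip(counts, row)]
--     return sum(1 for c in counts if c <= error)
-- ===== Notes on version B (the rewrite author's own statement) =====
-- stated objective: alternative
-- what changed: B transposes the two loops: instead of extracting each window and computing its Hamming distance (A), it sweeps once per kmer character across all windows, maintaining one vector of per-window mismatch counts, then counts entries <= error.
import Mathlib
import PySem

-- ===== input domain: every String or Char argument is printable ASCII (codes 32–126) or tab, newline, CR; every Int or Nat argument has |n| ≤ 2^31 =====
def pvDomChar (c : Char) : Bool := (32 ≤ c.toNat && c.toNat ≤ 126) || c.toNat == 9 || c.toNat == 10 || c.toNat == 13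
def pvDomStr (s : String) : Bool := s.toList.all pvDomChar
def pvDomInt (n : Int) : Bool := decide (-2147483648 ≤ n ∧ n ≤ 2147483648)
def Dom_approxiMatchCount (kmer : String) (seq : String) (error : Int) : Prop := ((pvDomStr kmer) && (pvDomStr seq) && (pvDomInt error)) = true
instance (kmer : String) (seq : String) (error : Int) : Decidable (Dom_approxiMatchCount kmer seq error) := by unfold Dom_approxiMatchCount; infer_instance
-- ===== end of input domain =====

-- B changes the traversal order (one sweep per kmer character over a vector of
-- per-window mismatch counts) instead of A's window-by-window Hamming distance;
-- objective: alternative (same asymptotic cost, different algorithm).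

-- B changes the traversal order: one sweep per kmer character over a vector of
-- per-window mismatch counts, instead of A's window-by-window Hamming distance
-- (objective: alternative; same asymptotic cost, different algorithm).

-- ===== PORT A =====
-- exact on its use here: the caller always passes q of p's length, so every index is in range
def hammingdistance (p : List Char) (q : List Char) : Int :=
  (PySem.List.pyRange 0 (p.length : Int) 1).foldl
    (fun count n =>
      if PySem.List.pyGet? p n ≠ PySem.List.pyGet? q n then count + 1 else count) 0

def approxiMatchCount (kmer : String) (seq : String) (error : Int) : Int :=
  let k := kmer.toList
  let s := seq.toList
  let l : Int := (k.length : Int)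
  let ps :=
    (PySem.List.pyRange 0 ((s.length : Int) + 1 - l) 1).foldl
      (fun ps n =>
        if hammingdistance k (PySem.List.slice s (some n) (some (n + l))) ≤ error
        then ps ++ [n] else ps) ([] : List Int)
  (ps.length : Int)

-- ===== PORT B =====
def approxiMatchCount_alt (kmer : String) (seq : String) (error : Int) : Int :=
  let k := kmer.toList
  let s := seq.toList
  let m : Int := (s.length : Int) + 1 - (k.length : Int)
  if m ≤ 0 then 0
  else
    let counts :=
      (PySem.List.enumerate k 0).foldl
        (fun counts p =>
          let row := PySem.List.slice s (some p.1) (some (p.1 + m))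
          List.zipWith (fun c x => if x ≠ p.2 then c + 1 else c) counts row)
        (List.replicate m.toNat (0 : Int))
    ((counts.filter (fun c => decide (c ≤ error))).length : Int)

-- ===== PRECONDITION & SPEC =====
def Spec_approxiMatchCount (kmer : String) (seq : String) (error : Int) (out : Int) : Prop := out = approxiMatchCount_alt kmer seq error
instance (kmer : String) (seq : String) (error : Int) (out : Int) : Decidable (Spec_approxiMatchCount kmer seq error out) := by unfold Spec_approxiMatchCount; infer_instance

-- ===== CLAIM (what is proved, stated in full; the proofs are below) =====
def Claim_equal_approxiMatchCount : Prop := ∀ (kmer : String) (seq : String) (error : Int), Dom_approxiMatchCount kmer seq error → Spec_approxiMatchCount kmer seq error (approxiMatchCount kmer seq error)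

-- ===== LEMMAS AND PROOFS =====

-- reference mismatch count of two char lists (compared position by position)
def mism : List Char → List Char → Int
  | a :: p, b :: q => (if a ≠ b then 1 else 0) + mism p q
  | _, _ => 0

theorem ham_aux (p : List Char) : ∀ (q P Q : List Char) (c : Int),
    q.length = p.length → P.length = Q.length →
    (PySem.List.pyRange (P.length : Int) ((P.length : Int) + (p.length : Int)) 1).foldl
      (fun count n =>
        if PySem.List.pyGet? (P ++ p) n ≠ PySem.List.pyGet? (Q ++ q) n then count + 1 else count) c
      = c + mism p q := by
  induction p with
  | nil =>
    intro q P Q c hq hPQ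
    rw [List.length_eq_zero_iff.mp hq]
    simp [mism]
  | cons a p ih =>
    intro q P Q c hq hPQ
    obtain ⟨b, q', rfl⟩ : ∃ b q', q = b :: q' := by
      cases q with
      | nil => simp at hq
      | cons b q' => exact ⟨b, q', rfl⟩
    rw [PySem.List.pyRange_one_cons (a := (P.length:Int)) (b := (P.length:Int) + ((a :: p).length:Int)) (by simp only [List.length_cons]; push_cast; omega)]
    simp only [List.foldl_cons]
    have hgetP : PySem.List.pyGet? (P ++ a :: p) (P.length : Int) = some a := by
      rw [PySem.List.pyGet?_natCast]
      simp
    have hgetQ : PySem.List.pyGet? (Q ++ b :: q') (P.length : Int) = some b := by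
      rw [hPQ, PySem.List.pyGet?_natCast]
      simp
    rw [hgetP, hgetQ]
    have hlen : ((P ++ [a]).length : Int) = (P.length : Int) + 1 := by simp
    have := ih q' (P ++ [a]) (Q ++ [b]) (if some a ≠ some b then c + 1 else c)
      (by simpa using hq) (by simp [hPQ])
    rw [hlen] at this
    simp only [List.append_assoc, List.singleton_append, List.length_cons] at this ⊢
    rw [show ((P.length : Int) + 1 + (p.length : Int)) = (P.length : Int) + ((p.length : Int) + 1) from by ring] at this
    push_cast at this ⊢
    rw [this, mism]
    by_cases hab : a = b
    · simp [hab]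
    · simp [hab]
      ring

theorem hammingdistance_eq (p q : List Char) (h : q.length = p.length) :
    hammingdistance p q = mism p q := by
  have := ham_aux p q [] [] 0 h rfl
  simp only [List.nil_append, List.length_nil, Nat.cast_zero, zero_add] at this
  exact this

theorem alt_fold (s : List Char) (mn : Nat) : ∀ (k : List Char) (j : Nat) (counts : List Int),
    counts.length = mn → j + mn + k.length ≤ s.length + 1 →
    (PySem.List.enumerate k (j : Int)).foldl
      (fun counts p =>
        List.zipWith (fun c x => if x ≠ p.2 then c + 1 else c) counts
          (PySem.List.slice s (some p.1) (some (p.1 + (mn : Int)))))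
      counts
      = (List.range mn).map
          (fun n => counts.getD n 0 + mism k ((s.drop (j + n)).take k.length)) := by
  intro k
  induction k with
  | nil =>
    intro j counts hlen _
    simp only [PySem.List.enumerate, List.foldl_nil]
    apply List.ext_getElem (by simpa using hlen)
    intro i h1 h2
    simp only [List.getElem_map, List.getElem_range, mism]
    rw [List.getD_eq_getElem _ _ (by omega)]
    simp
  | cons a k ih =>
    intro j counts hlen hbound
    rw [PySem.List.enumerate_cons, List.foldl_cons]
    have hjmn : j + mn ≤ s.length := by simp [List.length_cons] at hbound; omega
    have hrow : PySem.List.slice s (some ((j:Int))) (some ((j:Int) + (mn:Int))) = (s.drop j).take mn :=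
      PySem.List.slice_natCast_add s j mn
    have hrowlen : ((s.drop j).take mn).length = mn := by simp; omega
    have hclen : (List.zipWith (fun c x => if x ≠ a then c + 1 else c) counts ((s.drop j).take mn)).length = mn := by
      simp [hlen, hrowlen]
    have hcast : ((j:Int) + 1) = (((j+1 : Nat)):Int) := by push_cast; ring
    rw [hrow, hcast, ih (j+1) _ hclen (by simp at hbound ⊢; omega)]
    apply List.map_congr_left
    intro n hn
    rw [List.mem_range] at hn
    have hjn : j + n < s.length := by omega
    have hzip : (List.zipWith (fun c x => if x ≠ a then c + 1 else c) counts ((s.drop j).take mn)).getD n 0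
        = (if s[j+n] ≠ a then counts.getD n 0 + 1 else counts.getD n 0) := by
      rw [List.getD_eq_getElem _ _ (by omega)]
      rw [List.getElem_zipWith]
      rw [List.getElem_take, List.getElem_drop]
      rw [List.getD_eq_getElem _ _ (by omega)]
    have hwin : (s.drop (j + n)).take (k.length + 1) = s[j+n] :: (s.drop (j + n + 1)).take k.length := by
      rw [List.drop_eq_getElem_cons hjn, List.take_succ_cons]
    rw [hzip]
    simp only [List.length_cons, hwin, mism]
    rw [show j + 1 + n = j + n + 1 from by omega]
    by_cases hx : s[j+n] = a
    · simp [hx]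
    · simp [hx, Ne.symm hx]
      ring

theorem alt_fold0 (s : List Char) (mn : Nat) (k : List Char) (counts : List Int)
    (h1 : counts.length = mn) (h2 : mn + k.length ≤ s.length + 1) :
    (PySem.List.enumerate k 0).foldl
      (fun counts p =>
        List.zipWith (fun c x => if x ≠ p.2 then c + 1 else c) counts
          (PySem.List.slice s (some p.1) (some (p.1 + (mn : Int)))))
      counts
      = (List.range mn).map (fun n => counts.getD n 0 + mism k ((s.drop n).take k.length)) := by
  have := alt_fold s mn k 0 counts h1 (by omega)
  simpa using this

theorem ports_eq (kmer seq : String) (error : Int) :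
    approxiMatchCount kmer seq error = approxiMatchCount_alt kmer seq error := by
  simp only [approxiMatchCount, approxiMatchCount_alt]
  by_cases hm : ((seq.toList.length : Int) + 1 - (kmer.toList.length : Int)) ≤ 0
  · rw [PySem.List.pyRange_one_eq_nil hm, if_pos hm]
    simp
  · rw [if_neg hm]
    set k := kmer.toList with hk
    set s := seq.toList with hs
    set mn : Nat := (((s.length : Int) + 1 - (k.length : Int))).toNat with hmn
    have hmc : ((s.length : Int) + 1 - (k.length : Int)) = (mn : Int) := by omega
    have hks : k.length + mn = s.length + 1 := by omega
    -- A side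
    rw [PySem.List.foldl_append_ite_eq_filter
      (fun n => hammingdistance k (PySem.List.slice s (some n) (some (n + (k.length : Int)))) ≤ error)
      (PySem.List.pyRange 0 ((s.length : Int) + 1 - (k.length : Int)) 1) []]
    rw [List.nil_append, hmc, PySem.List.pyRange_zero_natCast, List.filter_map, List.length_map]
    -- B side
    rw [alt_fold0 s mn k _ (by simp) (by omega)]
    rw [List.filter_map, List.length_map]
    rw [← List.countP_eq_length_filter, ← List.countP_eq_length_filter]
    congr 1
    apply List.countP_congr
    intro t ht
    rw [List.mem_range] at ht
    have htk : t + k.length ≤ s.length := by omega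
    have hwinlen : ((s.drop t).take k.length).length = k.length := by simp; omega
    simp only [Function.comp]
    rw [PySem.List.slice_natCast_add s t k.length, hammingdistance_eq k _ hwinlen]
    simp

-- ===== VERDICT (by name: the statement is the Claim_ definition above) =====
theorem approxiMatchCount_spec : Claim_equal_approxiMatchCount := by
  intro kmer seq error _
  unfold Spec_approxiMatchCount
  exact ports_eq kmer seq error
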